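-- pv_equiv track=rewrite | github.com/Arize-ai/phoenix | src/phoenix/server/cost_tracking/regex_specificity.py | _has_start_anchor
-- ===== SOURCE A (Python) =====
-- def _has_start_anchor(pattern: str) -> bool:
--     """
--     Check if pattern has a start anchor (after all leading inline flags).
--     Handles multiple inline flags robustly.
--     """
--     i = 0
--     # Skip all leading inline flags
--     while pattern.startswith("(?", i):
--         close = pattern.find(")", i)
--         if close == -1:
--             break
--         i = close + 1
--     # After all flags, check for ^
--     return i < len(pattern) and pattern[i] == "^"
-- ===== SOURCE B (Python) =====
-- def _has_start_anchor(pattern: str) -> bool: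
--     # Partition the pattern at ')' boundaries; a leading inline-flag group is
--     # exactly a non-final part that starts with "(?".  The first part that is
--     # not such a flag (or the final part, after which there is no ')') carries
--     # the character the anchor check looks at.
--     parts = pattern.split(")")
--     for part in parts[:-1]:
--         if not part.startswith("(?"):
--             return part.startswith("^")
--     return parts[-1].startswith("^")
-- ===== Notes on version B (the rewrite author's own statement) =====
-- stated objective: alternative
-- what changed: B partitions the pattern into segments with pattern.split(')') and scans that list of parts (non-final parts starting with '(?' are flags; the first other part, or the final part, carries the anchor check), instead of A's in-place index loop with startswith/find over the original string.
import Mathlib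
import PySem

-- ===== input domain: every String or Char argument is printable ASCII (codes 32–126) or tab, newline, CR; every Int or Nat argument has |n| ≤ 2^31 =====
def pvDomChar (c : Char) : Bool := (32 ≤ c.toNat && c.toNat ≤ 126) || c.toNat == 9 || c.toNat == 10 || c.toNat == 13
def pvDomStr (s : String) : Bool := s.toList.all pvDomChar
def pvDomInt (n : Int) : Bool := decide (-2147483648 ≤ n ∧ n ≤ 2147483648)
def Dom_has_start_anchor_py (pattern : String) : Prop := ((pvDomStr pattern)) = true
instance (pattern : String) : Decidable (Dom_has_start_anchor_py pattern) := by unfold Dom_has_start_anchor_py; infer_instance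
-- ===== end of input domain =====

-- B splits the pattern into segments at ')' and scans that list of parts instead of
-- A's in-place index loop over the string (objective: alternative; values proved equal).

-- ===== PORT A =====
-- the while loop: i advances past each leading "(?...)" group; break when no ")" remains
def aLoop (cs : List Char) (i : Nat) : Nat :=
  if h1 : ['(', '?'] <+: cs.drop i then   -- pattern.startswith("(?", i)  (0 ≤ i, exact)
    let close := PySem.Chars.findFrom cs [')'] (i : Int) none   -- pattern.find(")", i)
    if h2 : close = -1 then i
    else aLoop cs (close.toNat + 1)
  else i
termination_by cs.length - i
decreasing_by
  have hne : cs.drop i ≠ [] := by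
    intro h; rw [h] at h1; exact (List.cons_ne_nil _ _) (List.prefix_nil.mp h1)
  have hi : i < cs.length := by
    by_contra hle
    exact hne (List.drop_eq_nil_iff.mpr (by omega))
  obtain ⟨hle, -, -⟩ :=
    PySem.Chars.findFrom_natCast_spec cs [')'] i (by omega) h2
  have : i ≤ close.toNat := by omega
  omega

-- A's return: i < len(pattern) and pattern[i] == "^"
-- (the getD default is never read: the && guard ensures i < cs.length)
def has_start_anchor_py (pattern : String) : Bool :=
  let cs := pattern.toList
  let i := aLoop cs 0
  decide (i < cs.length) && (cs.getD i ' ' == '^')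

-- ===== PORT B =====
-- the for loop of Source B over parts[:-1], with the final 'return parts[-1].startswith("^")'
-- as the single-element case; startswith → List.isPrefixOf
def bScan (parts : List (List Char)) : Bool :=
  match parts with
  | [] => false                                   -- unreachable: split never returns []
  | [last] => ['^'].isPrefixOf last               -- return parts[-1].startswith("^")
  | p :: rest =>
    if ['(', '?'].isPrefixOf p then bScan rest    -- flag part: keep scanning
    else ['^'].isPrefixOf p                       -- return part.startswith("^")

-- pattern.split(")") ported as List.splitOn ')' (Python's str.split with a one-char
-- separator, exact: same parts including empty ones)
def has_start_anchor_py_alt (pattern : String) : Bool :=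
  bScan (pattern.toList.splitOn ')')

-- ===== PRECONDITION & SPEC =====
def Spec_has_start_anchor_py (pattern : String) (out : Bool) : Prop := out = has_start_anchor_py_alt pattern
instance (pattern : String) (out : Bool) : Decidable (Spec_has_start_anchor_py pattern out) := by unfold Spec_has_start_anchor_py; infer_instance

-- ===== CLAIM (what is proved, stated in full; the proofs are below) =====
def Claim_equal_has_start_anchor_py : Prop := ∀ (pattern : String), Dom_has_start_anchor_py pattern → Spec_has_start_anchor_py pattern (has_start_anchor_py pattern)

-- ===== LEMMAS AND PROOFS =====

-- proof-side abstraction: the remainder of the string after the maximal run of leading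
-- complete "(?...)" groups; both ports are reduced to the head of this remainder
def flagsMatch (cs : List Char) : List Char :=
  match cs with
  | '(' :: '?' :: rest =>
    let d := rest.dropWhile (fun c => c ≠ ')')
    if d.isEmpty then cs else flagsMatch d.tail
  | _ => cs
termination_by cs.length
decreasing_by
  have h1 : (rest.dropWhile (fun c => c ≠ ')')).length ≤ rest.length :=
    List.length_dropWhile_le _ _
  have h2 : (rest.dropWhile (fun c => c ≠ ')')).tail.length
      = (rest.dropWhile (fun c => c ≠ ')')).length - 1 := List.length_tail
  simp only [List.length_cons]
  omega

lemma singleton_infix_of_mem {a : Char} {l : List Char} (h : a ∈ l) : [a] <:+: l := by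
  obtain ⟨s, t, rfl⟩ := List.append_of_mem h
  exact ⟨s, t, by simp⟩

lemma flagsMatch_not_flag (cs : List Char) (h : ¬ ['(', '?'] <+: cs) :
    flagsMatch cs = cs := by
  rw [flagsMatch.eq_def]
  split
  · rename_i rest
    exact absurd ⟨rest, rfl⟩ h
  · rfl

lemma dropWhile_eq_drop_first (l : List Char) (m : Nat)
    (h1 : ∀ j, j < m → ∀ (hjl : j < l.length), l[j] ≠ ')')
    (h2 : [')'] <+: l.drop m) :
    l.dropWhile (fun c => c ≠ ')') = l.drop m := by
  induction l generalizing m with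
  | nil => simp at h2 ⊢
  | cons c t ih =>
    cases m with
    | zero =>
      obtain ⟨t', ht'⟩ := h2
      simp only [List.drop_zero, List.singleton_append] at ht'
      injection ht' with hh _
      rw [List.dropWhile_cons, if_neg (by simp [← hh])]
      simp
    | succ m' =>
      have hc : c ≠ ')' := h1 0 (by omega) (by simp)
      rw [List.dropWhile_cons, if_pos (by simp [hc]), List.drop_succ_cons]
      exact ih m' (fun j hj hjl => h1 (j + 1) (by omega) (by simp; omega)) h2

-- A's loop leaves exactly flagsMatch's remainder
lemma aLoop_drop (cs : List Char) (i : Nat) (hi : i ≤ cs.length) :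
    aLoop cs i ≤ cs.length ∧ cs.drop (aLoop cs i) = flagsMatch (cs.drop i) := by
  generalize hn : cs.length - i = n
  induction n using Nat.strong_induction_on generalizing i with
  | _ n ih =>
    rw [aLoop]
    by_cases h1 : ['(', '?'] <+: cs.drop i
    · rw [dif_pos h1]
      obtain ⟨t, ht0⟩ := h1
      simp only [List.cons_append, List.nil_append] at ht0
      have ht : cs.drop i = '(' :: '?' :: t := ht0.symm
      have hti : i < cs.length := by
        by_contra hle
        rw [List.drop_eq_nil_iff.mpr (by omega)] at ht
        simp at ht
      have hrest : cs.drop (i + 2) = t := by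
        have h2 : List.drop 2 (List.drop i cs) = List.drop (i + 2) cs := List.drop_drop
        rw [← h2, ht]
        rfl
      rw [PySem.Chars.findFrom_natCast cs [')'] i hi]
      by_cases hf : PySem.Chars.find (cs.drop i) [')'] = -1
      · -- no closing ')' left: A breaks; the group is incomplete and stays
        rw [if_pos hf, dif_pos rfl]
        refine ⟨hi, ?_⟩
        have hno : ¬ [')'] <:+: cs.drop i := (PySem.Chars.find_eq_neg_one_iff _ _).mp hf
        have hmem : ∀ c ∈ t, c ≠ ')' := by
          intro c hc hcc
          subst hcc
          exact hno (singleton_infix_of_mem (by rw [ht]; simp [hc]))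
        rw [ht, flagsMatch.eq_def]
        simp only
        rw [if_pos (by
          simp only [List.isEmpty_iff, List.dropWhile_eq_nil_iff]
          intro c hc
          simpa using hmem c hc)]
      · -- ')' found at index i + f: A consumes through it; one group is consumed
        rw [if_neg hf]
        set f : Int := PySem.Chars.find (cs.drop i) [')'] with hfdef
        have hnn : 0 ≤ f := by
          have := PySem.Chars.neg_one_le_find (cs.drop i) [')']
          rw [← hfdef] at this
          omega
        rw [dif_neg (by omega)]
        obtain ⟨hpre, hmin⟩ := PySem.Chars.find_spec (s := cs.drop i) (sub := [')']) hnn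
        have htn : ((i : Int) + f).toNat = i + f.toNat := by omega
        have hdd : (cs.drop i).drop f.toNat = cs.drop (i + f.toNat) := List.drop_drop
        have hf0 : f.toNat ≠ 0 := by
          intro h0
          rw [h0, List.drop_zero, ht] at hpre
          obtain ⟨u, hu⟩ := hpre
          simp at hu
        have hf1 : f.toNat ≠ 1 := by
          intro h0
          rw [h0, ht] at hpre
          obtain ⟨u, hu⟩ := hpre
          simp at hu
        have hclose_lt : i + f.toNat < cs.length := by
          by_contra hge
          rw [hdd, List.drop_eq_nil_iff.mpr (by omega)] at hpre
          exact (List.cons_ne_nil _ _) (List.prefix_nil.mp hpre)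
        have hdw : t.dropWhile (fun c => c ≠ ')') = t.drop (f.toNat - 2) := by
          apply dropWhile_eq_drop_first
          · intro j hj hjl hcj
            refine hmin (j + 2) (by omega) ?_
            have hshift : (cs.drop i).drop (j + 2) = t.drop j := by
              rw [← hrest, List.drop_drop, List.drop_drop]
              ring_nf
            rw [hshift, List.drop_eq_getElem_cons hjl, hcj]
            exact ⟨_, rfl⟩
          · have hshift : t.drop (f.toNat - 2) = (cs.drop i).drop f.toNat := by
              rw [← hrest, List.drop_drop, hdd]
              congr 1
              omega
            rw [hshift]
            exact hpre
        have hd_eq : t.dropWhile (fun c => c ≠ ')') = cs.drop (i + f.toNat) := by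
          rw [hdw, ← hrest, List.drop_drop]
          congr 1
          omega
        obtain ⟨u, hu⟩ := hpre
        simp only [List.singleton_append] at hu
        have hne : ¬ (t.dropWhile (fun c => c ≠ ')')).isEmpty := by
          rw [hd_eq, ← hdd, ← hu]
          simp
        have htail : (t.dropWhile (fun c => c ≠ ')')).tail = cs.drop (i + f.toNat + 1) := by
          rw [hd_eq, List.tail_drop]
        have hfm : flagsMatch (cs.drop i) = flagsMatch (cs.drop (i + f.toNat + 1)) := by
          rw [ht, flagsMatch.eq_def]
          simp only
          rw [if_neg (by simpa using hne), htail]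
        have hstep := ih (cs.length - (i + f.toNat + 1)) (by omega) (i + f.toNat + 1)
          (by omega) rfl
        rw [htn, hfm]
        exact hstep
    · rw [dif_neg h1]
      exact ⟨hi, (flagsMatch_not_flag _ h1).symm⟩

lemma splitOn_eq (t : List Char) : t.splitOn ')' = t.splitOnP (· == ')') := rfl

lemma bScan_cons2 (p q : List Char) (qs : List (List Char)) :
    bScan (p :: q :: qs) = if ['(', '?'].isPrefixOf p then bScan (q :: qs)
      else ['^'].isPrefixOf p := rfl

-- B's split-then-scan computes the anchor check on flagsMatch's remainder
lemma bScan_flagsMatch (cs : List Char) :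
    bScan (cs.splitOn ')') = ['^'].isPrefixOf (flagsMatch cs) := by
  generalize hn : cs.length = n
  induction n using Nat.strong_induction_on generalizing cs with
  | _ n ih =>
    by_cases hmem : (')' : Char) ∈ cs
    · -- cs = xs ++ ')' :: t with no ')' in xs
      have hdw : cs.dropWhile (fun c => c ≠ ')') ≠ [] := by
        simp only [ne_eq, List.dropWhile_eq_nil_iff, not_forall]
        exact ⟨')', hmem, by simp⟩
      obtain ⟨d0, t, hd⟩ := List.exists_cons_of_ne_nil hdw
      have hd0 : d0 = ')' := by
        have hhead := List.head_dropWhile_not (p := fun c => decide (c ≠ ')')) hdw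
        simp only [hd, List.head_cons] at hhead
        simpa using hhead
      subst hd0
      set xs := cs.takeWhile (fun c => c ≠ ')') with hxs
      have hsplit : cs = xs ++ ')' :: t := by
        rw [hxs, ← hd, List.takeWhile_append_dropWhile]
      have hxs_no : ∀ x ∈ xs, ¬ ((x == ')') = true) := by
        intro x hx
        have := List.mem_takeWhile_imp hx
        simpa using this
      have hsp : cs.splitOn ')' = xs :: t.splitOn ')' := by
        rw [splitOn_eq, splitOn_eq, hsplit]
        exact List.splitOnP_first _ _ hxs_no ')' (by simp) t
      obtain ⟨q, qs, hq⟩ := List.exists_cons_of_ne_nil (List.splitOnP_ne_nil (· == ')') t)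
      have hsp2 : cs.splitOn ')' = xs :: q :: qs := by
        rw [hsp, splitOn_eq, hq]
      by_cases hflag : ['(', '?'].isPrefixOf xs
      · -- leading flag group: both sides recurse into t
        have hcs_flag : ['(', '?'] <+: cs := by
          refine List.IsPrefix.trans ?_ (hsplit ▸ List.prefix_append xs (')' :: t))
          exact List.isPrefixOf_iff_prefix.mp hflag
        obtain ⟨r, hr⟩ := hcs_flag
        simp only [List.cons_append, List.nil_append] at hr
        have hcs : cs = '(' :: '?' :: r := hr.symm
        have hrd : r.dropWhile (fun c => c ≠ ')') = ')' :: t := by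
          have : cs.dropWhile (fun c => c ≠ ')') = r.dropWhile (fun c => c ≠ ')') := by
            rw [hcs]
            simp
          rw [← this, hd]
        have hfm : flagsMatch cs = flagsMatch t := by
          rw [hcs, flagsMatch.eq_def]
          simp only
          rw [hrd]
          simp
        have hlen : t.length < n := by
          have := congrArg List.length hsplit
          simp at this
          omega
        rw [hsp2, bScan_cons2, if_pos hflag, hfm, ← hq, ← splitOn_eq]
        exact ih t.length hlen t rfl
      · -- first part is not a flag: both sides answer from xs / cs's head
        have hcs_not : ¬ ['(', '?'] <+: cs := by
          intro hcp
          apply hflag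
          rw [List.isPrefixOf_iff_prefix]
          obtain ⟨r, hr⟩ := hcp
          simp only [List.cons_append, List.nil_append] at hr
          have hcs : cs = '(' :: '?' :: r := hr.symm
          have : xs = '(' :: '?' :: r.takeWhile (fun c => c ≠ ')') := by
            rw [hxs, hcs]
            simp
          rw [this]
          exact ⟨_, rfl⟩
        rw [flagsMatch_not_flag cs hcs_not, hsp2, bScan_cons2, if_neg hflag]
        -- heads of xs and cs agree (or xs = [] and cs starts with ')')
        cases hx : xs with
        | nil =>
          have : cs = ')' :: t := by rw [hsplit, hx]; rfl
          rw [this]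
          simp [List.isPrefixOf]
        | cons c u =>
          have : cs = c :: (u ++ ')' :: t) := by rw [hsplit, hx]; rfl
          rw [this]
          simp [List.isPrefixOf]
    · -- no ')' at all: the split is [cs] and no complete group exists
      have hsp : cs.splitOn ')' = [cs] := by
        rw [splitOn_eq]
        exact List.splitOnP_eq_single _ _
          (by intro x hx h; exact hmem ((by simpa using h) ▸ hx))
      rw [hsp]
      show ['^'].isPrefixOf cs = ['^'].isPrefixOf (flagsMatch cs)
      by_cases hflag : ['(', '?'] <+: cs
      · obtain ⟨r, hr⟩ := hflag
        simp only [List.cons_append, List.nil_append] at hr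
        have hcs : cs = '(' :: '?' :: r := hr.symm
        have hrd : r.dropWhile (fun c => c ≠ ')') = [] := by
          rw [List.dropWhile_eq_nil_iff]
          intro x hx
          simp only [ne_eq, decide_eq_true_eq]
          intro h
          exact hmem (h ▸ (by rw [hcs]; simp [hx]))
        have : flagsMatch cs = cs := by
          rw [hcs, flagsMatch.eq_def]
          simp only
          rw [hrd]
          simp
        rw [this]
      · rw [flagsMatch_not_flag cs hflag]

-- ===== VERDICT (by name: the statement is the Claim_ definition above) =====
theorem has_start_anchor_py_spec : Claim_equal_has_start_anchor_py := by
  intro pattern _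
  unfold Spec_has_start_anchor_py has_start_anchor_py has_start_anchor_py_alt
  rw [bScan_flagsMatch]
  obtain ⟨hle, hdrop⟩ := aLoop_drop pattern.toList 0 (Nat.zero_le _)
  rw [List.drop_zero] at hdrop
  simp only
  rw [← hdrop]
  cases hdj : pattern.toList.drop (aLoop pattern.toList 0) with
  | nil =>
    have hlen : pattern.toList.length ≤ aLoop pattern.toList 0 := List.drop_eq_nil_iff.mp hdj
    have hsl : pattern.toList.length = pattern.length := String.length_toList
    simp only [List.isPrefixOf]
    simp only [Bool.and_eq_false_iff, decide_eq_false_iff_not]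
    left
    omega
  | cons c u =>
    have hjlt : aLoop pattern.toList 0 < pattern.toList.length := by
      by_contra hge
      rw [List.drop_eq_nil_iff.mpr (by omega)] at hdj
      simp at hdj
    have hsl : pattern.toList.length = pattern.length := String.length_toList
    have hget : pattern.toList.getD (aLoop pattern.toList 0) ' ' = c := by
      have h0 : (pattern.toList.drop (aLoop pattern.toList 0))[0]?
          = pattern.toList[aLoop pattern.toList 0]? := by
        simp [List.getElem?_drop]
      rw [hdj] at h0
      simp only [List.getElem?_cons_zero] at h0
      rw [List.getD_eq_getElem?_getD, ← h0]
      rfl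
    rw [hget]
    simp only [List.isPrefixOf, Bool.and_true]
    by_cases hc : c = '^'
    · subst hc
      simp
      omega
    · rw [show (c == '^') = false by simpa using hc,
          show (('^' : Char) == c) = false by simpa using fun h => hc h.symm]
      simp
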